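-- pv_equiv track=rewrite | github.com/MattTriano/triage | triage/feature_group_mixer.py | leave_one_out
-- ===== SOURCE A (Python) =====
-- def leave_one_out(feature_groups):
--     """For each group, return a copy of all groups excluding that group
--
--     Args:
--         feature_groups (list) The feature groups to apply the strategy to
--
--     Returns: A list of feature dicts
--     """
--     results = []
--     for index_to_exclude in range(0, len(feature_groups)):
--         group_copy = feature_groups.copy()
--         del group_copy[index_to_exclude]
--         feature_dict = {}
--         for group in group_copy:
--             feature_dict.update(group)
--         results.append(feature_dict)
--     return results
-- ===== SOURCE B (Python) =====
-- def leave_one_out(feature_groups):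
--     """For each group, return a copy of all groups excluding that group"""
--     prefixes = []
--     acc = {}
--     for group in feature_groups:
--         prefixes.append(acc)
--         acc = {**acc, **group}
--     suffixes = []
--     acc = {}
--     for group in reversed(feature_groups):
--         suffixes.append(acc)
--         acc = {**group, **acc}
--     suffixes.reverse()
--     return [{**pre, **suf} for pre, suf in zip(prefixes, suffixes)]
-- ===== Notes on version B (the rewrite author's own statement) =====
-- stated objective: alternative
-- what changed: Replaces the per-index list copy + re-merge of all other groups with two directional accumulation passes (prefix merges left-to-right, suffix merges right-to-left) combined per index so the suffix overrides the prefix.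
import Mathlib
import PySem

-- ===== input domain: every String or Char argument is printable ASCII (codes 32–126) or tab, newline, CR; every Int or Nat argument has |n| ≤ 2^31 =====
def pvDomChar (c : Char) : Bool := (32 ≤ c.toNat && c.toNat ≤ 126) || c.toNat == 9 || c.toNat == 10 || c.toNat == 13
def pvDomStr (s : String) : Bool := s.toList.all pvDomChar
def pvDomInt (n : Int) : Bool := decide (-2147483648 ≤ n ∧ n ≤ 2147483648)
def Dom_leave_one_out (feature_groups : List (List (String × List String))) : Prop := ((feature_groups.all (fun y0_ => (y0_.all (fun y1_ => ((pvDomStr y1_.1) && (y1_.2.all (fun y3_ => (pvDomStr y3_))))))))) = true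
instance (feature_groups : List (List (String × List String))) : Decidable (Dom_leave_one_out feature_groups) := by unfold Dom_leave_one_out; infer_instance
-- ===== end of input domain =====

-- B replaces A's per-index copy + full re-merge by two directional accumulation passes
-- (prefix merges left-to-right, suffix merges right-to-left) combined per index: alternative decomposition.

-- ===== PORT A =====
-- 'del group_copy[index_to_exclude]' is ported as take/drop at that index; exact because
-- the pyRange index satisfies 0 ≤ idx < len(fg), so .toNat is the Python index.
def leave_one_out (feature_groups : List (List (String × List String))) : List (List (String × List String)) :=
  (PySem.List.pyRange 0 (feature_groups.length : Int)).foldl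
    (fun results idx =>
      results ++
        [((feature_groups.take idx.toNat ++ feature_groups.drop (idx.toNat + 1)).foldl
            (fun feature_dict group => feature_dict.update group)
            (PySem.Dict.empty : PySem.Dict String (List String))).items])
    []

-- ===== PORT B =====
-- prefix pass: acc after i groups is the merge of groups[0:i]; suffix pass over the reversed
-- list: acc is the merge of the groups to the right; combine with suffix overriding prefix.
def leave_one_out_alt (feature_groups : List (List (String × List String))) : List (List (String × List String)) :=
  let prefixes :=
    (feature_groups.foldl
      (fun (st : List (PySem.Dict String (List String)) × PySem.Dict String (List String)) group =>
        (st.1 ++ [st.2], st.2.update group))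
      ([], PySem.Dict.empty)).1
  let suffixes :=
    ((feature_groups.reverse.foldl
      (fun (st : List (PySem.Dict String (List String)) × PySem.Dict String (List String)) group =>
        (st.1 ++ [st.2], ((PySem.Dict.empty : PySem.Dict String (List String)).update group).update st.2.items))
      ([], PySem.Dict.empty)).1).reverse
  (prefixes.zip suffixes).map (fun ps => (ps.1.update ps.2.items).items)

-- ===== PRECONDITION & SPEC =====
def Spec_leave_one_out (feature_groups : List (List (String × List String))) (out : List (List (String × List String))) : Prop := out = leave_one_out_alt feature_groups
instance (feature_groups : List (List (String × List String))) (out : List (List (String × List String))) : Decidable (Spec_leave_one_out feature_groups out) := by unfold Spec_leave_one_out; infer_instance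

-- ===== CLAIM (what is proved, stated in full; the proofs are below) =====
def Claim_equal_leave_one_out : Prop := ∀ (feature_groups : List (List (String × List String))), Dom_leave_one_out feature_groups → Spec_leave_one_out feature_groups (leave_one_out feature_groups)

-- ===== LEMMAS AND PROOFS =====

theorem dict_insert_comm {κ ν : Type} [BEq κ] [LawfulBEq κ] (d : PySem.Dict κ ν)
    (k a : κ) (v b : ν) (hka : k ≠ a) (hk : d.contains k = true) :
    (d.insert a b).insert k v = (d.insert k v).insert a b := by
  have hkeq : (k == a) = false := by simp [hka]
  have haeq : (a == k) = false := by simp [Ne.symm hka]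
  by_cases hca : d.contains a = true
  · have h1 : (d.insert a b).contains k = true := by
      simp [PySem.Dict.contains_insert, hkeq, hk]
    have h2 : (d.insert k v).contains a = true := by
      simp [PySem.Dict.contains_insert, haeq, hca]
    apply PySem.Dict.ext
    rw [PySem.Dict.items_insert_of_contains _ _ h1, PySem.Dict.items_insert_of_contains _ _ hca,
        PySem.Dict.items_insert_of_contains _ _ h2, PySem.Dict.items_insert_of_contains _ _ hk]
    simp only [List.map_map]
    apply List.map_congr_left
    intro p _
    by_cases h : p.1 = a
    · simp [h, haeq]
    · by_cases h' : p.1 = k <;> simp [h, h', hkeq]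
  · have hca' : d.contains a = false := by simpa using hca
    have h1 : (d.insert a b).contains k = true := by
      simp [PySem.Dict.contains_insert, hkeq, hk]
    have h2 : (d.insert k v).contains a = false := by
      -- keys of d.insert k v : a == k is false and a not in d
      simp [PySem.Dict.contains_insert, haeq, hca']
    apply PySem.Dict.ext
    rw [PySem.Dict.items_insert_of_contains _ _ h1,
        PySem.Dict.items_insert_of_not_contains _ _ hca',
        PySem.Dict.items_insert_of_not_contains _ _ h2,
        PySem.Dict.items_insert_of_contains _ _ hk]
    simp only [List.map_append, List.map_cons, List.map_nil, haeq]
    simp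

theorem dict_update_insert_comm {κ ν : Type} [BEq κ] [LawfulBEq κ] (l : List (κ × ν))
    (d : PySem.Dict κ ν) (k : κ) (v : ν) (hk : d.contains k = true)
    (hl : ∀ p ∈ l, p.1 ≠ k) :
    (d.update l).insert k v = (d.insert k v).update l := by
  induction l generalizing d with
  | nil => rfl
  | cons p t ih =>
    have hpk : p.1 ≠ k := hl p (by simp)
    have hk' : (d.insert p.1 p.2).contains k = true := by
      simp [PySem.Dict.contains_insert, hk]
    show ((d.insert p.1 p.2).update t).insert k v = _
    rw [ih _ hk' (fun q hq => hl q (by simp [hq])),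
        dict_insert_comm d k p.1 v p.2 (Ne.symm hpk) hk]
    rfl

theorem dict_update_insert {κ ν : Type} [BEq κ] [LawfulBEq κ] (e : PySem.Dict κ ν)
    (he : e.keys.Nodup) (d : PySem.Dict κ ν) (k : κ) (v : ν) :
    d.update ((e.insert k v).items) = (d.update e.items).insert k v := by
  by_cases hc : e.contains k = true
  · rw [PySem.Dict.items_insert_of_contains _ _ hc]
    -- walk down e.items; k occurs exactly once among its keys
    obtain ⟨its⟩ := e
    have hmem : k ∈ its.map Prod.fst := by
      have := (PySem.Dict.contains_iff_mem_keys ⟨its⟩ k).mp hc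
      simpa [PySem.Dict.keys] using this
    have hnd : (its.map Prod.fst).Nodup := by simpa [PySem.Dict.keys] using he
    clear hc he
    induction its generalizing d with
    | nil => simp at hmem
    | cons p t ih =>
      by_cases hpk : p.1 = k
      · have hknt : k ∉ t.map Prod.fst := by
          rw [List.map_cons, List.nodup_cons] at hnd
          simpa [hpk] using hnd.1
        have hrepl : t.map (fun q => if (q.1 == k) = true then (k, v) else q) = t := by
          refine (List.map_congr_left (g := id) ?_).trans (List.map_id t)
          intro q hq
          have : q.1 ≠ k := fun h => hknt (h ▸ List.mem_map_of_mem hq)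
          simp [this]
        show PySem.Dict.update d (_ :: _) = _
        simp only [hpk, beq_self_eq_true, hrepl]
        show (d.insert k v).update t = ((d.insert p.1 p.2).update t).insert k v
        rw [dict_update_insert_comm t (d.insert p.1 p.2) k v
              (by simp [hpk])
              (fun q hq => fun h => hknt (h ▸ List.mem_map_of_mem hq))]
        rw [hpk, PySem.Dict.insert_insert_self]
      · have hkt : k ∈ t.map Prod.fst := by
          rcases List.mem_map.mp hmem with ⟨q, hq, hq1⟩
          rcases List.mem_cons.mp hq with h | h
          · exact absurd (h ▸ hq1) hpk
          · exact List.mem_map.mpr ⟨q, h, hq1⟩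
        have hnd' : (t.map Prod.fst).Nodup := by
          rw [List.map_cons, List.nodup_cons] at hnd; exact hnd.2
        show PySem.Dict.update d (_ :: _) = _
        have hpkb : (p.1 == k) = false := by simp [hpk]
        show PySem.Dict.update d ((if (p.1 == k) = true then (k, v) else p) :: _) = _
        rw [hpkb]
        show PySem.Dict.update (d.insert p.1 p.2) _ = _
        rw [ih (d.insert p.1 p.2) hkt hnd']
        rfl
  · have hc' : e.contains k = false := by simpa using hc
    rw [PySem.Dict.items_insert_of_not_contains _ _ hc']
    show PySem.Dict.update d (e.items ++ [(k, v)]) = _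
    rw [PySem.Dict.update, List.foldl_append]
    rfl

theorem dict_update_update {κ ν : Type} [BEq κ] [LawfulBEq κ] (t : List (κ × ν))
    (e : PySem.Dict κ ν) (he : e.keys.Nodup) (d : PySem.Dict κ ν) :
    d.update ((e.update t).items) = (d.update e.items).update t := by
  induction t generalizing e with
  | nil => rfl
  | cons p t ih =>
    show d.update (((e.insert p.1 p.2).update t).items) = _
    rw [ih (e.insert p.1 p.2) (PySem.Dict.nodup_keys_insert e p.1 p.2 he),
        dict_update_insert e he d p.1 p.2]
    rfl

def suffixMerge (gs : List (List (String × List String))) : PySem.Dict String (List String) :=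
  gs.foldr (fun g acc => ((PySem.Dict.empty : PySem.Dict String (List String)).update g).update acc.items)
    PySem.Dict.empty

theorem foldl_update_eq_suffixMerge (gs : List (List (String × List String)))
    (P : PySem.Dict String (List String)) :
    gs.foldl (fun d g => d.update g) P = P.update (suffixMerge gs).items := by
  induction gs generalizing P with
  | nil => rfl
  | cons g t ih =>
    show (t.foldl (fun d g => d.update g) (P.update g)) = _
    rw [ih (P.update g)]
    show _ = P.update ((((PySem.Dict.empty : PySem.Dict String (List String)).update g).update (suffixMerge t).items).items)
    rw [dict_update_update _ _ (PySem.Dict.nodup_keys_update _ g PySem.Dict.nodup_keys_empty) P,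
        dict_update_update g PySem.Dict.empty (by exact PySem.Dict.nodup_keys_empty) P]
    rfl

theorem pass_fst {α β : Type} (step : α → β → β) (xs : List α) (l : List β) (a : β) :
    (xs.foldl (fun st g => (st.1 ++ [st.2], step g st.2)) (l, a)).1
      = l ++ (List.range xs.length).map (fun j => (xs.take j).foldl (fun acc g => step g acc) a) := by
  induction xs generalizing l a with
  | nil => simp
  | cons x t ih =>
    show (t.foldl _ (l ++ [a], step x a)).1 = _
    rw [ih (l ++ [a]) (step x a)]
    simp [List.range_succ_eq_map, List.map_map, Function.comp]

theorem main_eq (fg : List (List (String × List String))) : leave_one_out fg = leave_one_out_alt fg := by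
  unfold leave_one_out leave_one_out_alt
  rw [PySem.List.pyRange_zero_natCast fg.length,
      PySem.List.foldl_append_singleton_eq_map
        (f := fun idx : Int =>
          ((fg.take idx.toNat ++ fg.drop (idx.toNat + 1)).foldl
            (fun d g => d.update g) (PySem.Dict.empty : PySem.Dict String (List String))).items),
      List.map_map]
  rw [pass_fst (fun g (b : PySem.Dict String (List String)) => b.update g) fg [] PySem.Dict.empty,
      pass_fst (fun g (b : PySem.Dict String (List String)) =>
        ((PySem.Dict.empty : PySem.Dict String (List String)).update g).update b.items)
        fg.reverse [] PySem.Dict.empty]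

  apply List.ext_getElem
  · simp
  · intro i h1 h2
    have hi : i < fg.length := by simpa using h1
    simp only [List.nil_append, List.length_map, List.length_range, List.length_reverse,
      List.getElem_map, List.getElem_zip, List.getElem_reverse, List.getElem_range,
      Function.comp_apply, Int.toNat_natCast]
    rw [List.take_reverse, List.foldl_reverse]
    have hdrop : fg.length - (fg.length - 1 - i) = i + 1 := by omega
    rw [hdrop]
    show ((fg.take i ++ fg.drop (i + 1)).foldl (fun d g => d.update g) PySem.Dict.empty).items = _
    rw [List.foldl_append, foldl_update_eq_suffixMerge]
    rfl

-- ===== VERDICT (by name: the statement is the Claim_ definition above) =====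
theorem leave_one_out_spec : Claim_equal_leave_one_out := by
  intro feature_groups _
  unfold Spec_leave_one_out
  exact main_eq feature_groups
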